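-- pv_equiv track=rewrite | github.com/TAMU-CPT/galaxy-tools | tools/gff3/cpt_gff3_parser.py | validateID
-- ===== SOURCE A (Python) =====
-- validID = '.:^*$@!+_?-|'
--
-- def validateID(idIn):
--     badChar = []
--     for x in idIn:
--       if (ord(x) > 47 and ord(x) < 58) or (ord(x) > 64 and ord(x) < 91) or (ord(x) > 96 and ord(x) < 123) or (x in validID):
--         continue
--       else:
--         if not(x in badChar):
--           badChar.append(x)
--     return badChar
-- ===== SOURCE B (Python) =====
-- _ALLOWED = set('0123456789ABCDEFGHIJKLMNOPQRSTUVWXYZabcdefghijklmnopqrstuvwxyz.:^*$@!+_?-|')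
--
--
-- def validateID(idIn):
--     # set algebra: the distinct bad characters, order-free
--     bad = set(idIn) - _ALLOWED
--     # recover first-occurrence order by sorting on each char's first index
--     return sorted(bad, key=idIn.find)
-- ===== Notes on version B (the rewrite author's own statement) =====
-- stated objective: alternative
-- what changed: A's single interleaved scan (per-char ord-range test plus append-if-new dedup against the growing result list) is replaced by set algebra plus a sort: set(idIn) - _ALLOWED yields the distinct bad characters order-free, and sorting them by idIn.find restores first-occurrence order.
import Mathlib
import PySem

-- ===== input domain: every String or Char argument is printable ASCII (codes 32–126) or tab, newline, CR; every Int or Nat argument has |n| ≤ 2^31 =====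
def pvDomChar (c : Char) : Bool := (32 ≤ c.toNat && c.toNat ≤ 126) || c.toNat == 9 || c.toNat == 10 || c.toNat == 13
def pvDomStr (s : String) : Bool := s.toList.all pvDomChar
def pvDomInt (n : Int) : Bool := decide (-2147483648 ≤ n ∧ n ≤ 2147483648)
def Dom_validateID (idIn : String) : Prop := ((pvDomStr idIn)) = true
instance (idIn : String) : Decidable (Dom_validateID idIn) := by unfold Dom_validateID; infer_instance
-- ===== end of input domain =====

set_option maxRecDepth 8192

-- B replaces A's interleaved scan+dedup loop by set difference (the distinct bad characters,
-- order-free) followed by a sort on each character's first index; objective: alternative.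

-- ===== PORT A =====
def validID : List Char := ".:^*$@!+_?-|".toList

def validateID (idIn : String) : List String :=
  idIn.toList.foldl
    (fun badChar x =>
      if (47 < x.toNat && x.toNat < 58) || (64 < x.toNat && x.toNat < 91) ||
         (96 < x.toNat && x.toNat < 123) || validID.contains x then
        badChar
      else
        if badChar.contains (String.ofList [x]) then badChar
        else badChar ++ [String.ofList [x]])
    []

-- ===== PORT B =====
-- Python's _ALLOWED = set('…'): built once, only membership is used (order-independent, so exact)
def allowedB : PySem.Set Char :=
  PySem.Set.ofList "0123456789ABCDEFGHIJKLMNOPQRSTUVWXYZabcdefghijklmnopqrstuvwxyz.:^*$@!+_?-|".toList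

-- sorted(set(idIn) - _ALLOWED, key=idIn.find): the sort key (first index in idIn) is injective on
-- the distinct characters, so the result does not depend on set iteration order (exact port).
def validateID_alt (idIn : String) : List String :=
  let bad := PySem.Set.diff (PySem.Set.ofList idIn.toList) allowedB
  (PySem.List.sorted bad (fun c => PySem.Str.find idIn (String.ofList [c]))).map
    (fun c => String.ofList [c])

-- ===== PRECONDITION & SPEC =====
def Spec_validateID (idIn : String) (out : List String) : Prop := out = validateID_alt idIn
instance (idIn : String) (out : List String) : Decidable (Spec_validateID idIn out) := by unfold Spec_validateID; infer_instance

-- ===== CLAIM (what is proved, stated in full; the proofs are below) =====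
def Claim_equal_validateID : Prop := ∀ (idIn : String), Dom_validateID idIn → Spec_validateID idIn (validateID idIn)

-- ===== LEMMAS AND PROOFS =====

lemma char_eq_iff_toNat (a b : Char) : a = b ↔ a.toNat = b.toNat := by
  constructor
  · rintro rfl; rfl
  · intro h; exact Char.ext (UInt32.toNat_inj.mp h)

lemma allowedB_eq : allowedB = ['0', '1', '2', '3', '4', '5', '6', '7', '8', '9', 'A', 'B', 'C', 'D', 'E', 'F', 'G', 'H', 'I', 'J', 'K', 'L', 'M', 'N', 'O', 'P', 'Q', 'R', 'S', 'T', 'U', 'V', 'W', 'X', 'Y', 'Z', 'a', 'b', 'c', 'd', 'e', 'f', 'g', 'h', 'i', 'j', 'k', 'l', 'm', 'n', 'o', 'p', 'q', 'r', 's', 't', 'u', 'v', 'w', 'x', 'y', 'z', '.', ':', '^', '*', '$', '@', '!', '+', '_', '?', '-', '|'] := by decide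

lemma validID_eq : validID = ['.', ':', '^', '*', '$', '@', '!', '+', '_', '?', '-', '|'] := by decide

-- A's per-character test is exactly membership in B's allowed set
lemma cond_eq_allowed (x : Char) :
    ((47 < x.toNat && x.toNat < 58) || (64 < x.toNat && x.toNat < 91) ||
     (96 < x.toNat && x.toNat < 123) || validID.contains x)
    = PySem.Set.contains allowedB x := by
  apply Bool.eq_iff_iff.mpr
  simp only [validID_eq, allowedB_eq, PySem.Set.contains]
  simp only [List.contains_eq_mem, List.mem_cons, List.not_mem_nil, or_false,
    Bool.or_eq_true, Bool.and_eq_true, decide_eq_true_eq, char_eq_iff_toNat]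
  simp only [Char.reduceToNat]
  omega

-- A's loop, with the test rewritten to allowed-membership, is a fold of Set.add over the filtered, mapped list
lemma foldA_eq (l : List Char) (acc : List String) :
    l.foldl
      (fun badChar x =>
        if PySem.Set.contains allowedB x then badChar
        else
          if badChar.contains (String.ofList [x]) then badChar
          else badChar ++ [String.ofList [x]]) acc
    = ((l.filter (fun c => !(PySem.Set.contains allowedB c))).map (fun c => String.ofList [c])).foldl
        PySem.Set.add acc := by
  induction l generalizing acc with
  | nil => rfl
  | cons x l ih =>
    simp only [List.foldl_cons, List.filter_cons]
    by_cases h : PySem.Set.contains allowedB x = true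
    · simp only [h, Bool.not_true, if_true, Bool.false_eq_true, if_false]
      exact ih acc
    · simp only [Bool.not_eq_true] at h
      simp only [h, Bool.not_false, if_true, Bool.false_eq_true, if_false, List.map_cons,
        List.foldl_cons]
      have hadd : PySem.Set.add acc (String.ofList [x])
          = if acc.contains (String.ofList [x]) then acc else acc ++ [String.ofList [x]] := rfl
      rw [hadd]
      exact ih _

-- mapping a char to its one-character string is injective
lemma mk1_inj : Function.Injective (fun c : Char => String.ofList [c]) := by
  intro a b h
  have := congrArg String.toList h
  simpa using this

lemma map_add_inj (s : PySem.Set Char) (x : Char) :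
    (PySem.Set.add s x).map (fun c => String.ofList [c])
      = PySem.Set.add (s.map (fun c => String.ofList [c])) (String.ofList [x]) := by
  unfold PySem.Set.add
  have hcc : PySem.Set.contains (s.map (fun c => String.ofList [c])) (String.ofList [x])
      = PySem.Set.contains s x := by
    simp only [PySem.Set.contains, List.contains_eq_mem]
    exact decide_eq_decide.mpr (List.mem_map_of_injective mk1_inj)
  rw [hcc]
  by_cases hm : x ∈ s
  · simp [PySem.Set.contains, List.contains_eq_mem, hm]
  · simp [PySem.Set.contains, List.contains_eq_mem, hm]

lemma map_foldl_add (l : List Char) (acc : PySem.Set Char) :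
    (l.foldl PySem.Set.add acc).map (fun c => String.ofList [c])
      = (l.map (fun c => String.ofList [c])).foldl PySem.Set.add
          (acc.map (fun c => String.ofList [c])) := by
  induction l generalizing acc with
  | nil => rfl
  | cons x l ih =>
    simp only [List.foldl_cons, List.map_cons]
    rw [ih, map_add_inj]

-- Set.ofList commutes with the injective one-character-string map
lemma ofList_map (l : List Char) :
    PySem.Set.ofList (l.map (fun c => String.ofList [c]))
      = (PySem.Set.ofList l).map (fun c => String.ofList [c]) := by
  simpa [PySem.Set.ofList, PySem.Set.empty] using (map_foldl_add l []).symm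

lemma filter_add (p : Char → Bool) (s : PySem.Set Char) (x : Char) :
    (PySem.Set.add s x).filter p
      = if p x then PySem.Set.add (s.filter p) x else s.filter p := by
  unfold PySem.Set.add
  by_cases hc : PySem.Set.contains s x = true
  · have hx : x ∈ s := by simpa [PySem.Set.contains, List.contains_eq_mem] using hc
    simp only [hc, if_true]
    by_cases hp : p x
    · simp [hp, hx]
    · simp [hp]
  · rw [Bool.not_eq_true] at hc
    have hx : x ∉ s := by simpa [PySem.Set.contains, List.contains_eq_mem] using hc
    simp only [hc, Bool.false_eq_true, if_false, List.filter_append, List.filter_cons]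
    by_cases hp : p x
    · simp [hp, hx]
    · simp [hp]

lemma filter_foldl_add (p : Char → Bool) (l : List Char) (acc : PySem.Set Char) :
    (l.foldl PySem.Set.add acc).filter p
      = (l.filter p).foldl PySem.Set.add (acc.filter p) := by
  induction l generalizing acc with
  | nil => rfl
  | cons x l ih =>
    simp only [List.foldl_cons, List.filter_cons]
    rw [ih, filter_add]
    by_cases hp : p x
    · simp [hp]
    · simp [hp]

-- filtering by a per-character predicate commutes with Set.ofList (first-occurrence dedup)
lemma filter_ofList (p : Char → Bool) (l : List Char) :
    (PySem.Set.ofList l).filter p = PySem.Set.ofList (l.filter p) := by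
  simpa [PySem.Set.ofList, PySem.Set.empty] using filter_foldl_add p l []

lemma ofList_append_singleton {α : Type} [BEq α] (l : List α) (x : α) :
    PySem.Set.ofList (l ++ [x]) = PySem.Set.add (PySem.Set.ofList l) x := by
  simp [PySem.Set.ofList, List.foldl_append]

-- the elements of set(l) appear in order of strictly increasing first index in l
lemma pairwise_idxOf (l : List Char) :
    (PySem.Set.ofList l).Pairwise (fun a b => l.idxOf a < l.idxOf b) := by
  induction l using List.reverseRecOn with
  | nil => simp [PySem.Set.ofList, PySem.Set.empty]
  | append_singleton l x ih =>
    rw [ofList_append_singleton]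
    have hmem : ∀ a ∈ PySem.Set.ofList l, a ∈ l := fun a ha => (PySem.Set.mem_ofList l a).mp ha
    have hP : (PySem.Set.ofList l).Pairwise (fun a b => (l ++ [x]).idxOf a < (l ++ [x]).idxOf b) := by
      refine ih.imp_of_mem ?_
      intro a b ha hb hr
      rw [List.idxOf_append_of_mem (hmem a ha), List.idxOf_append_of_mem (hmem b hb)]
      exact hr
    unfold PySem.Set.add
    by_cases hc : (PySem.Set.ofList l).contains x = true
    · simp only [hc, if_true]; exact hP
    · have hx : x ∉ l := by
        simp only [PySem.Set.contains, List.contains_eq_mem, decide_eq_true_eq,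
          PySem.Set.mem_ofList] at hc
        exact hc
      rw [Bool.not_eq_true] at hc
      simp only [hc, Bool.false_eq_true, if_false]
      rw [List.pairwise_append]
      refine ⟨hP, by simp, ?_⟩
      intro a ha b hb
      simp only [List.mem_singleton] at hb
      subst hb
      rw [List.idxOf_append_of_mem (hmem a ha)]
      have h1 : l.idxOf a < l.length := List.idxOf_lt_length_of_mem (hmem a ha)
      have h2 : (l ++ [b]).idxOf b = l.length := by simp [List.idxOf_append, hx]
      omega

lemma prefix_singleton_iff (m : List Char) (c : Char) : [c] <+: m ↔ m.head? = some c := by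
  cases m <;> simp [List.cons_prefix_iff, eq_comm]

lemma idxOf_le_of_getElem (l : List Char) (c : Char) (i : Nat) (hi : i < l.length) (h : l[i] = c) :
    l.idxOf c ≤ i := by
  unfold List.idxOf
  by_contra hlt
  have := List.not_of_lt_findIdx (p := (· == c)) (xs := l) (i := i) (by omega)
  simp at this
  exact this h

-- on a member, find of the one-character string is the first index
lemma find_singleton (l : List Char) (c : Char) (h : c ∈ l) :
    PySem.Chars.find l [c] = (l.idxOf c : Int) := by
  have hinf : [c] <:+: l := by
    obtain ⟨s, t, rfl⟩ := List.append_of_mem h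
    exact ⟨s, t, by simp⟩
  have hnn : 0 ≤ PySem.Chars.find l [c] := (PySem.Chars.find_nonneg_iff l [c]).mpr hinf
  obtain ⟨hpre, hmin⟩ := PySem.Chars.find_spec hnn
  set n := (PySem.Chars.find l [c]).toNat with hn
  have hget : l[n]? = some c := by
    rw [← List.head?_drop]
    exact (prefix_singleton_iff _ c).mp hpre
  have hnlt : n < l.length := (List.getElem?_eq_some_iff.mp hget).1
  have h1 : l.idxOf c ≤ n := idxOf_le_of_getElem l c n hnlt (List.getElem?_eq_some_iff.mp hget).2
  have h2 : n ≤ l.idxOf c := by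
    by_contra hlt
    have hilt : l.idxOf c < l.length := List.idxOf_lt_length_of_mem h
    have : ¬ [c] <+: l.drop (l.idxOf c) := hmin _ (by omega)
    rw [prefix_singleton_iff, ← List.getElem?_eq_some_iff.mpr ⟨hilt, List.getElem_idxOf hilt⟩,
      List.head?_drop] at this
    exact this rfl
  have : n = l.idxOf c := le_antisymm h2 h1
  omega

-- B's sort input is already in first-occurrence order, so the sort is the identity on it
lemma sorted_diff_eq (idIn : String) :
    PySem.List.sorted (PySem.Set.diff (PySem.Set.ofList idIn.toList) allowedB)
      (fun c => PySem.Str.find idIn (String.ofList [c]))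
    = (PySem.Set.ofList idIn.toList).filter (fun c => !(PySem.Set.contains allowedB c)) := by
  apply PySem.List.sorted_eq_of_perm_of_pairwise_lt
  · exact List.Perm.refl _
  · apply List.Pairwise.imp_of_mem (R := fun a b => idIn.toList.idxOf a < idIn.toList.idxOf b)
    · intro a b ha hb hr
      have ha' : a ∈ idIn.toList :=
        (PySem.Set.mem_ofList idIn.toList a).mp (List.mem_of_mem_filter ha)
      have hb' : b ∈ idIn.toList :=
        (PySem.Set.mem_ofList idIn.toList b).mp (List.mem_of_mem_filter hb)
      simp only [PySem.Str.find_eq]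
      have hma : (String.ofList [a]).toList = [a] := by simp
      have hmb : (String.ofList [b]).toList = [b] := by simp
      rw [hma, hmb, find_singleton idIn.toList a ha', find_singleton idIn.toList b hb']
      exact_mod_cast hr
    · exact List.Pairwise.filter _ (pairwise_idxOf idIn.toList)

-- ===== VERDICT (by name: the statement is the Claim_ definition above) =====
theorem validateID_spec : Claim_equal_validateID := by
  intro idIn _
  show validateID idIn = validateID_alt idIn
  have hA : validateID idIn
      = PySem.Set.ofList
          ((idIn.toList.filter (fun c => !(PySem.Set.contains allowedB c))).map
            (fun c => String.ofList [c])) := by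
    unfold validateID
    have hcongr := PySem.List.foldl_congr_mem (l := idIn.toList) (init := ([] : List String))
      (f := fun badChar x =>
        if (47 < x.toNat && x.toNat < 58) || (64 < x.toNat && x.toNat < 91) ||
           (96 < x.toNat && x.toNat < 123) || validID.contains x then
          badChar
        else
          if badChar.contains (String.ofList [x]) then badChar
          else badChar ++ [String.ofList [x]])
      (g := fun badChar x =>
        if PySem.Set.contains allowedB x then badChar
        else
          if badChar.contains (String.ofList [x]) then badChar
          else badChar ++ [String.ofList [x]])
      (by intro acc x _; simp only [cond_eq_allowed])
    rw [hcongr, foldA_eq]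
    rfl
  have hB : validateID_alt idIn
      = ((PySem.Set.ofList idIn.toList).filter (fun c => !(PySem.Set.contains allowedB c))).map
          (fun c => String.ofList [c]) := by
    show (PySem.List.sorted (PySem.Set.diff (PySem.Set.ofList idIn.toList) allowedB)
        (fun c => PySem.Str.find idIn (String.ofList [c]))).map (fun c => String.ofList [c]) = _
    rw [sorted_diff_eq]
  rw [hA, hB, filter_ofList, ofList_map]
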